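-- pv_equiv track=rewrite | github.com/xukangjune/Leetcode | 笔试/拼多多/_2.py | dfs
-- ===== SOURCE A (Python) =====
-- def dfs(idx, m, n, str, b, op):
--     if idx == n:
--         if str == b:
--             return [op]
--         return None
--
--     c = m[idx]
--     ans = []
--     ret = dfs(idx+1, m, n, str, b, op+'d')
--     if ret:
--         ans.extend(ret)
--
--     ret = dfs(idx+1, m, n, c+str, b, op+'l')
--     if ret:
--         ans.extend(ret)
--
--
--     ret = dfs(idx+1, m, n, str+c, b, op+'r')
--     if ret:
--         ans.extend(ret)
--
--     return ans
-- ===== SOURCE B (Python) =====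
-- def dfs(idx, m, n, str, b, op):
--     # Level-by-level worklist instead of ternary recursion; prunes states whose
--     # current stringing cannot extend to b (not a substring, or too short to finish).
--     if idx >= n:
--         return [op] if str == b else None
--     states = [(str, op)]
--     for j in range(idx, n):
--         c = m[j]
--         nxt = []
--         for s, o in states:
--             if s in b and len(b) - len(s) <= n - j:
--                 nxt.append((s, o + 'd'))
--                 nxt.append((c + s, o + 'l'))
--                 nxt.append((s + c, o + 'r'))
--         states = nxt
--     return [o for s, o in states if s == b]
-- ===== Notes on version B (the rewrite author's own statement) =====
-- stated objective: alternative
-- what changed: Replaced A's ternary DFS recursion over all delete/prepend/append sequences by an iterative level-by-level worklist that prunes any intermediate string that is not a contiguous substring of b or is too short to reach len(b) in the remaining steps; surviving states are expanded in d/l/r order so the result list is identical.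
import Mathlib
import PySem

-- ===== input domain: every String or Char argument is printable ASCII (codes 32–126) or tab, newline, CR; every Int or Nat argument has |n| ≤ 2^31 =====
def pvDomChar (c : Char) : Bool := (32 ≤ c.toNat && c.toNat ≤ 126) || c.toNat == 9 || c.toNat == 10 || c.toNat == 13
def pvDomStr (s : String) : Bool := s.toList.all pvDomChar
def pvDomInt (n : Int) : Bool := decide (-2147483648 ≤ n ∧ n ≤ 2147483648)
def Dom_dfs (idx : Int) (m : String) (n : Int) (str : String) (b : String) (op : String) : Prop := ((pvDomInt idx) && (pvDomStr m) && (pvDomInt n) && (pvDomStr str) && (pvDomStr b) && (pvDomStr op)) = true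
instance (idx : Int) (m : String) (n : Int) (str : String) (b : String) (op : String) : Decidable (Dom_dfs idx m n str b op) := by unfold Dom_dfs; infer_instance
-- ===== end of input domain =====

-- B replaces A's ternary DFS recursion by a level-by-level worklist that prunes states
-- which cannot extend to b (objective: alternative algorithm, same result list).

-- ===== PORT A =====
-- A's recursion, on char lists, with fuel = number of levels left before idx reaches n
-- (fuel only makes the recursion total; where Python raises IndexError the port returns none).
def dfsA (m b : List Char) (n : Int) : Nat → Int → List Char → List Char → Option (List String)
  | f, idx, str, op =>
    if idx = n then
      (if str = b then some [String.ofList op] else none)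
    else
      match f with
      | 0 => none
      | f + 1 =>
        match PySem.List.pyGet? m idx with
        | none => none
        | some c =>
          let a1 := match dfsA m b n f (idx + 1) str (op ++ ['d']) with
                    | some r => r | none => []
          let a2 := match dfsA m b n f (idx + 1) (c :: str) (op ++ ['l']) with
                    | some r => r | none => []
          let a3 := match dfsA m b n f (idx + 1) (str ++ [c]) (op ++ ['r']) with
                    | some r => r | none => []
          some (a1 ++ a2 ++ a3)

def dfs (idx : Int) (m : String) (n : Int) (str : String) (b : String) (op : String) : Option (List String) :=
  dfsA m.toList b.toList n (n - idx).toNat idx str.toList op.toList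

-- ===== PORT B =====
-- one expansion level of the worklist: keep a state only if its string is still a
-- contiguous substring of b and enough characters remain to reach b's length
def dfsStep (b : List Char) (c : Char) (rem : Nat) (states : List (List Char × List Char)) : List (List Char × List Char) :=
  states.flatMap (fun so =>
    if so.1 <:+: b ∧ (b.length : Int) - so.1.length ≤ (rem : Int) then
      [(so.1, so.2 ++ ['d']), (c :: so.1, so.2 ++ ['l']), (so.1 ++ [c], so.2 ++ ['r'])]
    else [])

-- the level loop: fuel = remaining levels n - j; at the end, collect ops whose string is b
def dfsBGo (m b : List Char) : Nat → Int → List (List Char × List Char) → Option (List String)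
  | 0, _, states => some (states.filterMap (fun so => if so.1 = b then some (String.ofList so.2) else none))
  | f + 1, j, states =>
    match PySem.List.pyGet? m j with
    | none => none
    | some c => dfsBGo m b f (j + 1) (dfsStep b c (f + 1) states)

def dfs_alt (idx : Int) (m : String) (n : Int) (str : String) (b : String) (op : String) : Option (List String) :=
  if idx ≥ n then (if str = b then some [op] else none)
  else dfsBGo m.toList b.toList (n - idx).toNat idx [(str.toList, op.toList)]

-- ===== PRECONDITION & SPEC =====
-- Pre_ excludes exactly the inputs where A raises IndexError: idx > n (the recursion
-- overruns m) or some index in [idx, n) outside Python's valid range for m.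
def Pre_dfs (idx : Int) (m : String) (n : Int) (str : String) (b : String) (op : String) : Prop :=
  idx ≤ n ∧ (idx < n → (-(m.length : Int) ≤ idx ∧ n ≤ (m.length : Int)))
instance (idx : Int) (m : String) (n : Int) (str : String) (b : String) (op : String) : Decidable (Pre_dfs idx m n str b op) := by unfold Pre_dfs; infer_instance

def pvWitness_dfs : Int × String × Int × String × String × String := (0, "ab", 2, "", "ab", "")

def Spec_dfs (idx : Int) (m : String) (n : Int) (str : String) (b : String) (op : String) (out : Option (List String)) : Prop := out = dfs_alt idx m n str b op
instance (idx : Int) (m : String) (n : Int) (str : String) (b : String) (op : String) (out : Option (List String)) : Decidable (Spec_dfs idx m n str b op out) := by unfold Spec_dfs; infer_instance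

-- ===== CLAIM (what is proved, stated in full; the proofs are below) =====
def Claim_equal_dfs : Prop := ∀ (idx : Int) (m : String) (n : Int) (str : String) (b : String) (op : String), Dom_dfs idx m n str b op → Pre_dfs idx m n str b op → Spec_dfs idx m n str b op (dfs idx m n str b op)

-- ===== LEMMAS AND PROOFS =====

-- A's contribution of a state to the flattened answer list
def collectA (m b : List Char) (n : Int) (f : Nat) (idx : Int) (str op : List Char) : List String :=
  match dfsA m b n f idx str op with
  | some r => r
  | none => []

theorem collectA_eq (m b : List Char) (n : Int) (f : Nat) (idx : Int) (str op : List Char) :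
    collectA m b n f idx str op = match dfsA m b n f idx str op with | some r => r | none => [] := rfl

-- pruning soundness: a state that is not an infix of b, or too short to ever reach b's
-- length within f more steps, contributes nothing in A
theorem collectA_pruned (m b : List Char) (n : Int) (f : Nat) (idx : Int) (str op : List Char)
    (hidx : idx + f = n)
    (h : ¬ (str <:+: b) ∨ (f : Int) < (b.length : Int) - (str.length : Int)) :
    collectA m b n f idx str op = [] := by
  induction f generalizing idx str op with
  | zero =>
    have hid : idx = n := by omega
    by_cases he : str = b
    · exfalso; subst he
      rcases h with h | h
      · exact h List.infix_rfl
      · norm_num at h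
    · simp [collectA, dfsA, hid, he]
  | succ f ih =>
    have hid : ¬ (idx = n) := by omega
    rcases hc : PySem.List.pyGet? m idx with _ | c
    · simp [collectA, dfsA, hid, hc]
    · have h1 : collectA m b n f (idx + 1) str (op ++ ['d']) = [] := by
        apply ih _ _ _ (by omega)
        rcases h with h | h
        · exact Or.inl h
        · right; push_cast at h ⊢; omega
      have h2 : collectA m b n f (idx + 1) (c :: str) (op ++ ['l']) = [] := by
        apply ih _ _ _ (by omega)
        rcases h with h | h
        · left; intro hin
          exact h (List.IsInfix.trans (List.suffix_cons c str).isInfix hin)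
        · right; simp only [List.length_cons]; push_cast at h ⊢; omega
      have h3 : collectA m b n f (idx + 1) (str ++ [c]) (op ++ ['r']) = [] := by
        apply ih _ _ _ (by omega)
        rcases h with h | h
        · left; intro hin
          exact h (List.IsInfix.trans (List.prefix_append str [c]).isInfix hin)
        · right; simp only [List.length_append, List.length_cons, List.length_nil]
          push_cast at h ⊢; omega
      simp only [collectA] at h1 h2 h3 ⊢
      conv_lhs => rw [dfsA]
      simp [hid, hc, h1, h2, h3]

-- B's level loop computes exactly the concatenation of A's contributions of its states
theorem dfsBGo_eq_flatMap (m b : List Char) (n : Int) (f : Nat) (j : Int) (hj : j + f = n)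
    (hget : ∀ k : Nat, k < f → (PySem.List.pyGet? m (j + k)).isSome)
    (S : List (List Char × List Char)) :
    dfsBGo m b f j S = some (S.flatMap (fun so => collectA m b n f j so.1 so.2)) := by
  induction f generalizing j S with
  | zero =>
    have hj' : j = n := by omega
    subst hj'
    simp only [dfsBGo, Option.some.injEq]
    induction S with
    | nil => simp
    | cons hd tl ihS =>
      simp only [List.filterMap_cons, List.flatMap_cons, ← ihS]
      by_cases h : hd.1 = b <;> simp [collectA, dfsA, h]
  | succ f ih =>
    have h0 : (PySem.List.pyGet? m j).isSome := by
      have := hget 0 (by omega); simpa using this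
    rcases hc : PySem.List.pyGet? m j with _ | c
    · rw [hc] at h0; simp at h0
    · simp only [dfsBGo, hc]
      rw [ih (j + 1) (by omega)
        (by intro k hk
            have := hget (k + 1) (by omega)
            push_cast at this ⊢
            have he : j + 1 + (k : Int) = j + ((k : Int) + 1) := by ring
            rw [he]; exact this)]
      congr 1
      rw [dfsStep, List.flatMap_assoc]
      apply List.flatMap_congr
      intro so _
      by_cases hp : so.1 <:+: b ∧ (b.length : Int) - so.1.length ≤ ((f + 1 : Nat) : Int)
      · -- kept state: unfold one level of A
        have hid : ¬ (j = n) := by omega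
        simp only [if_pos hp, List.flatMap_cons, List.flatMap_nil, List.append_nil]
        conv_rhs => rw [collectA, dfsA]
        simp only [if_neg hid, hc, ← collectA_eq, List.append_assoc]
      · -- pruned state: A contributes nothing
        simp only [if_neg hp, List.flatMap_nil]
        rw [collectA_pruned m b n (f + 1) j so.1 so.2 (by omega)]
        rw [not_and_or] at hp
        rcases hp with hp | hp
        · exact Or.inl hp
        · right; push_cast at hp ⊢; omega

-- ===== VERDICT (by name: the statement is the Claim_ definition above) =====
theorem dfs_spec : Claim_equal_dfs := by
  intro idx m n str b op _ hpre
  rcases hpre with ⟨hle, hrange⟩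
  unfold Spec_dfs dfs dfs_alt
  by_cases hn : idx ≥ n
  · have hid : idx = n := by omega
    subst hid
    simp only [ge_iff_le, le_refl, if_pos]
    have hf : (idx - idx).toNat = 0 := by omega
    rw [hf]
    simp only [dfsA]
    by_cases h : str = b
    · have : str.toList = b.toList := by rw [h]
      simp [h]
    · have : ¬ (str.toList = b.toList) := fun he => h (by
        have := congrArg String.ofList he; simpa using this)
      simp [this, h]
  · simp only [if_neg hn]
    have hlt : idx < n := by omega
    obtain ⟨hlo, hhi⟩ := hrange hlt
    have hlen : m.toList.length = (m.length : Nat) := by simp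
    rw [dfsBGo_eq_flatMap m.toList b.toList n ((n - idx).toNat) idx (by omega)
      (by intro k hk
          rw [Option.isSome_iff_ne_none]
          intro hnone
          rw [PySem.List.pyGet?_eq_none_iff] at hnone
          apply hnone
          simp only [PySem.Raise.InRange, hlen]
          push_cast
          omega)]
    simp only [List.flatMap_cons, List.flatMap_nil, List.append_nil]
    rw [collectA_eq]
    have hf : ∃ f : Nat, (n - idx).toNat = f + 1 := ⟨(n - idx).toNat - 1, by omega⟩
    obtain ⟨f, hfe⟩ := hf
    rw [hfe]
    rcases hc : PySem.List.pyGet? m.toList idx with _ | c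
    · rw [PySem.List.pyGet?_eq_none_iff] at hc
      exfalso; apply hc
      constructor <;> (simp only [hlen]; push_cast; omega)
    · have hid : ¬ (idx = n) := by omega
      conv_lhs => rw [dfsA]
      conv_rhs => rw [dfsA]
      simp [hid, hc]
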